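-- pv_equiv track=rewrite | github.com/kilolonion/excelmanus | excelmanus/approval.py | _is_excluded_rel
-- ===== SOURCE A (Python) =====
-- from typing import Any, Callable, Sequence
--
-- def _is_excluded_rel(rel_path: str, prefixes: Sequence[str]) -> bool:
--     normalized = rel_path.replace("\\", "/").strip("/")
--     if not normalized:
--         return False
--     for prefix in prefixes:
--         if normalized == prefix or normalized.startswith(f"{prefix}/"):
--             return True
--     return False
-- ===== SOURCE B (Python) =====
-- def _is_excluded_rel(rel_path, prefixes):
--     normalized = rel_path.replace("\\", "/").strip("/")
--     if not normalized:
--         return False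
--     prefix_set = set(prefixes)
--     candidates = {normalized[:i] for i, ch in enumerate(normalized) if ch == "/"}
--     candidates.add(normalized)
--     return any(c in prefix_set for c in candidates)
-- ===== Notes on version B (the rewrite author's own statement) =====
-- stated objective: alternative
-- what changed: Instead of scanning every prefix and testing equality/startswith against the path, B builds the set of ancestor candidates of the path (its prefixes ending at each '/' plus the whole path) in one pass over the path's characters and tests membership in a set built from the prefixes once.
import Mathlib
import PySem

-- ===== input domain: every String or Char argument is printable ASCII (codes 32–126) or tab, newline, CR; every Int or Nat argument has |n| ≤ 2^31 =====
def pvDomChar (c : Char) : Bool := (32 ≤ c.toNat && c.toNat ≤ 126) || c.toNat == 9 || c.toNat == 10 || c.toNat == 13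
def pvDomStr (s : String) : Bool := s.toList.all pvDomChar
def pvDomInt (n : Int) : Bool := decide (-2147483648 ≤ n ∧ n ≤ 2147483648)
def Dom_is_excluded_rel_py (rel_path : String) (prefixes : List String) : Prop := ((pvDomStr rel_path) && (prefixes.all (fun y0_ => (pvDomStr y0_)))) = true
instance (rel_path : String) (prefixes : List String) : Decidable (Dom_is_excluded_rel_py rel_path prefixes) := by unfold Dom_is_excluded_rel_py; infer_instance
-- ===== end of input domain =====

-- B replaces the per-prefix equality/startswith scan by building the path's ancestor-candidate set once and testing set membership (alternative decomposition, proved equal).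


-- ===== PORT A =====
-- literal port of A: normalize, then scan the prefixes, returning at the first match (early-return loop = List.any)
def is_excluded_rel_py (rel_path : String) (prefixes : List String) : Bool :=
  let normalized := PySem.Chars.stripChars (PySem.Chars.replace rel_path.toList ['\\'] ['/']) ['/']
  if normalized = [] then false
  else prefixes.any (fun prefix_ =>
    decide (normalized = prefix_.toList) || PySem.Chars.startswith normalized (prefix_.toList ++ ['/']))

-- ===== PORT B =====
-- literal port of Source B: same normalization, then the candidate set {normalized[:i] | normalized[i]='/'} ∪ {normalized},
-- tested for membership in set(prefixes)
def is_excluded_rel_py_alt (rel_path : String) (prefixes : List String) : Bool :=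
  let normalized := PySem.Chars.stripChars (PySem.Chars.replace rel_path.toList ['\\'] ['/']) ['/']
  if normalized = [] then false
  else
    let prefix_set : PySem.Set (List Char) := PySem.Set.ofList (prefixes.map String.toList)
    let candidates : PySem.Set (List Char) :=
      PySem.Set.add
        (PySem.Set.ofList ((PySem.List.enumerate normalized 0).filterMap
          (fun ic => if ic.2 = '/' then some (PySem.List.slice normalized none (some ic.1)) else none)))
        normalized
    candidates.any (fun c => PySem.Set.contains prefix_set c)

-- ===== PRECONDITION & SPEC =====
def Spec_is_excluded_rel_py (rel_path : String) (prefixes : List String) (out : Bool) : Prop := out = is_excluded_rel_py_alt rel_path prefixes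
instance (rel_path : String) (prefixes : List String) (out : Bool) : Decidable (Spec_is_excluded_rel_py rel_path prefixes out) := by unfold Spec_is_excluded_rel_py; infer_instance

-- ===== CLAIM (what is proved, stated in full; the proofs are below) =====
def Claim_equal_is_excluded_rel_py : Prop := ∀ (rel_path : String) (prefixes : List String), Dom_is_excluded_rel_py rel_path prefixes → Spec_is_excluded_rel_py rel_path prefixes (is_excluded_rel_py rel_path prefixes)

-- ===== LEMMAS AND PROOFS =====

-- the candidate list of B characterises exactly A's per-prefix test
lemma mem_cand_iff (n p : List Char) :
    (n = p ∨ (p ++ ['/']) <+: n) ↔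
      (p ∈ (PySem.List.enumerate n 0).filterMap
          (fun ic => if ic.2 = '/' then some (PySem.List.slice n none (some ic.1)) else none) ∨ p = n) := by
  constructor
  · rintro (rfl | ⟨t, ht⟩)
    · exact Or.inr rfl
    · refine Or.inl ?_
      rw [List.mem_filterMap]
      have hk : p.length < n.length := by
        rw [← ht]; simp [List.length_append]
      refine ⟨((p.length : Int), n[p.length]), ?_, ?_⟩
      · rw [PySem.List.mem_enumerate_iff]
        exact ⟨p.length, hk, by simp⟩
      · have hget : n[p.length] = '/' := by
          have : n[p.length]? = some '/' := by
            rw [← ht, List.append_assoc, List.getElem?_append_right (le_refl _)]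
            simp
          simpa [List.getElem?_eq_getElem hk] using this
        have htake : n.take p.length = p := by
          rw [← ht, List.append_assoc, List.take_left]
        simp [hget, PySem.List.slice_to_natCast, htake]
  · rintro (hp | rfl)
    · refine Or.inr ?_
      rw [List.mem_filterMap] at hp
      obtain ⟨ic, hmem, hf⟩ := hp
      rw [PySem.List.mem_enumerate_iff] at hmem
      obtain ⟨k, hk, rfl⟩ := hmem
      split at hf
      case isTrue hslash =>
        have hs : n[k] = '/' := hslash
        have hpt : p = n.take k := by
          simpa [PySem.List.slice_to_natCast] using (Option.some.inj hf).symm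
        subst hpt
        have hcat : n.take (k+1) = n.take k ++ ['/'] := by
          rw [List.take_add_one]; simp [List.getElem?_eq_getElem hk, hs]
        rw [← hcat]
        exact List.take_prefix _ _
      case isFalse => simp at hf
    · exact Or.inl rfl

theorem is_excluded_rel_py_spec : Claim_equal_is_excluded_rel_py := by
  intro rel_path prefixes _
  unfold Spec_is_excluded_rel_py is_excluded_rel_py is_excluded_rel_py_alt
  set n := PySem.Chars.stripChars (PySem.Chars.replace rel_path.toList ['\\'] ['/']) ['/'] with hn
  by_cases hne : n = []
  · simp [hne]
  · simp only [if_neg hne]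
    rw [Bool.eq_iff_iff]
    simp only [List.any_eq_true, PySem.Set.mem_add, PySem.Set.mem_ofList,
      PySem.Set.contains, List.contains_iff_mem, List.mem_map,
      PySem.Chars.startswith_iff, Bool.or_eq_true, decide_eq_true_eq]
    constructor
    · rintro ⟨p, hp, hmatch⟩
      exact ⟨p.toList, (mem_cand_iff n p.toList).1 hmatch, p, hp, rfl⟩
    · rintro ⟨c, hc, hcp⟩
      obtain ⟨p, hp, hpc⟩ := hcp
      subst hpc
      exact ⟨p, hp, (mem_cand_iff n p.toList).2 hc⟩
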